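-- pv_equiv track=rewrite | github.com/SumithBaddam/2048-AI-Bot | logic_IJK.py | __cover_up
-- ===== SOURCE A (Python) =====
-- def __cover_up(mat):
--     new = [[' ',' ',' ',' '],[' ',' ',' ',' '],[' ',' ',' ',' '],[' ',' ',' ',' ']]
--     done = False
--     for i in range(4):
--         count = 0
--         for j in range(4):
--             if mat[i][j] != ' ':
--                 new[i][count] = mat[i][j]
--                 if j != count:
--                     done = True
--                 count += 1
--     return (new, done)
-- ===== SOURCE B (Python) =====
-- def __cover_up(mat):
--     # Stable sort each row with blanks keyed last: non-blank tiles keep their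
--     # relative order and move left; 'done' is one whole-matrix comparison.
--     rows = [[mat[i][j] for j in range(4)] for i in range(4)]
--     new = [sorted(row, key=lambda x: x == ' ') for row in rows]
--     return (new, new != rows)
-- ===== Notes on version B (the rewrite author's own statement) =====
-- stated objective: alternative
-- what changed: Replaces A's count-cursor compaction pass with per-tile movement flagging by a stable sort of each row keyed on blankness (blanks sort last, non-blanks keep order) and a single whole-matrix comparison to detect movement.
import Mathlib
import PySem

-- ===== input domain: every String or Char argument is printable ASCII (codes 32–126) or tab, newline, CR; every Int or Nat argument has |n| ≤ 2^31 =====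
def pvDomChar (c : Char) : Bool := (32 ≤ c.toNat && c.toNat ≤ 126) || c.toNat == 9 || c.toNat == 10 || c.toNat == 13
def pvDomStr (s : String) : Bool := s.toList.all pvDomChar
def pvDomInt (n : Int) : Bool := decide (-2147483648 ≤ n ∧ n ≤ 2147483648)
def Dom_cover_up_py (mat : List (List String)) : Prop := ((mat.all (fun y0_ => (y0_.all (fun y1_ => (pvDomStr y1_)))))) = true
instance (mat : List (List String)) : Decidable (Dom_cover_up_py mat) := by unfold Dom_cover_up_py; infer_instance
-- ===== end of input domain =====

-- B compacts each row by a STABLE SORT keyed on blankness (blanks sort last, non-blanks keep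
-- their relative order) and detects movement by ONE whole-matrix comparison, instead of A's
-- count-cursor writes into a preallocated 4x4 matrix with a per-tile j≠count movement test.
-- ===== PORT A =====
-- the inner 'for j in range(4)' loop of A; state = (new[i], count, done)
def coverUpInner (row : List String) (st0 : List String × Int × Bool) : List String × Int × Bool :=
  (PySem.List.pyRange 0 4 1).foldl (fun st j =>
    let v := (PySem.List.pyGet? row j).getD " "
    if v ≠ " " then
      (st.1.set st.2.1.toNat v, st.2.1 + 1, st.2.2 || decide (j ≠ st.2.1))
    else st) st0

def cover_up_py (mat : List (List String)) : List (List String) × Bool :=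
  let new : List (List String) :=
    [[" ", " ", " ", " "], [" ", " ", " ", " "], [" ", " ", " ", " "], [" ", " ", " ", " "]]
  (PySem.List.pyRange 0 4 1).foldl (fun (st : List (List String) × Bool) i =>
    let row := (PySem.List.pyGet? mat i).getD []
    let inner := coverUpInner row ((PySem.List.pyGet? st.1 i).getD [], 0, st.2)
    (st.1.set i.toNat inner.1, inner.2.2)) (new, false)

-- ===== PORT B =====
-- Python's bool sort key (False < True) is ported as the Int key 0/1.
def cover_up_py_alt (mat : List (List String)) : List (List String) × Bool :=
  let rows := (PySem.List.pyRange 0 4 1).map (fun i =>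
    (PySem.List.pyRange 0 4 1).map (fun j =>
      (PySem.List.pyGet? ((PySem.List.pyGet? mat i).getD []) j).getD " "))
  let new := rows.map (fun row =>
    PySem.List.sorted row (fun x => if x = " " then (1 : Int) else 0) false)
  (new, decide (new ≠ rows))

-- ===== PRECONDITION & SPEC =====
-- Pre_ excludes exactly the inputs on which A raises IndexError: fewer than 4 rows, or one of the
-- first 4 rows shorter than 4 entries.
def Pre_cover_up_py (mat : List (List String)) : Prop :=
  4 ≤ mat.length ∧ ∀ r ∈ mat.take 4, 4 ≤ r.length
instance (mat : List (List String)) : Decidable (Pre_cover_up_py mat) := by unfold Pre_cover_up_py; infer_instance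
def pvWitness_cover_up_py : List (List String) :=
  [[" ", "2", " ", "2"], ["4", " ", " ", " "], [" ", " ", " ", " "], ["2", "4", "8", "16"]]

def Spec_cover_up_py (mat : List (List String)) (out : List (List String) × Bool) : Prop := out = cover_up_py_alt mat
instance (mat : List (List String)) (out : List (List String) × Bool) : Decidable (Spec_cover_up_py mat out) := by unfold Spec_cover_up_py; infer_instance

-- ===== CLAIM (what is proved, stated in full; the proofs are below) =====
def Claim_equal_cover_up_py : Prop := ∀ (mat : List (List String)), Dom_cover_up_py mat → Pre_cover_up_py mat → Spec_cover_up_py mat (cover_up_py mat)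

-- ===== LEMMAS AND PROOFS =====
theorem pg0 {α : Type} (a : α) (t : List α) : PySem.List.pyGet? (a::t) 0 = some a := by
  simp [PySem.List.pyGet?, PySem.List.pyIdx?]
theorem pg1 {α : Type} (a b : α) (t : List α) : PySem.List.pyGet? (a::b::t) 1 = some b := by
  simp [PySem.List.pyGet?, PySem.List.pyIdx?]
theorem pg2 {α : Type} (a b c : α) (t : List α) : PySem.List.pyGet? (a::b::c::t) 2 = some c := by
  simp [PySem.List.pyGet?, PySem.List.pyIdx?]; rw [if_pos (by omega)]; simp
theorem pg3 {α : Type} (a b c d : α) (t : List α) : PySem.List.pyGet? (a::b::c::d::t) 3 = some d := by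
  simp [PySem.List.pyGet?, PySem.List.pyIdx?]; rw [if_pos (by omega)]; simp
theorem pyRange4 : PySem.List.pyRange 0 4 1 = [0, 1, 2, 3] := by decide
theorem set0 {α : Type} (x0 x1 x2 x3 v : α) : [x0,x1,x2,x3].set (Int.toNat 0) v = [v,x1,x2,x3] := rfl
theorem set1 {α : Type} (x0 x1 x2 x3 v : α) : [x0,x1,x2,x3].set (Int.toNat 1) v = [x0,v,x2,x3] := rfl
theorem set2 {α : Type} (x0 x1 x2 x3 v : α) : [x0,x1,x2,x3].set (Int.toNat 2) v = [x0,x1,v,x3] := rfl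
theorem set3 {α : Type} (x0 x1 x2 x3 v : α) : [x0,x1,x2,x3].set (Int.toNat 3) v = [x0,x1,x2,v] := rfl

-- A's inner loop on one row produces exactly B's stable sort of that row (with B's
-- done-contribution: the row changed)
theorem row_equiv (a b c d : String) (t : List String) (done : Bool) :
    ∃ cnt : Int,
      coverUpInner (a :: b :: c :: d :: t) ([" ", " ", " ", " "], 0, done)
        = (PySem.List.sorted [a, b, c, d] (fun x => if x = " " then (1 : Int) else 0) false, cnt,
           done || decide (PySem.List.sorted [a, b, c, d]
             (fun x => if x = " " then (1 : Int) else 0) false ≠ [a, b, c, d])) := by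
  refine ⟨(coverUpInner (a :: b :: c :: d :: t) ([" ", " ", " ", " "], 0, done)).2.1, ?_⟩
  by_cases ha : a = " " <;> by_cases hb : b = " " <;> by_cases hc : c = " " <;>
    by_cases hd : d = " " <;>
  simp_all [coverUpInner, pyRange4, pg1, pg2, pg3,
    PySem.List.sorted, PySem.List.insertBy, List.set, eq_comm]

theorem row_fst (a b c d : String) (t : List String) (done : Bool) :
    (coverUpInner (a :: b :: c :: d :: t) ([" ", " ", " ", " "], 0, done)).1
      = PySem.List.sorted [a, b, c, d] (fun x => if x = " " then (1 : Int) else 0) false := by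
  obtain ⟨k, e⟩ := row_equiv a b c d t done; rw [e]

theorem row_done (a b c d : String) (t : List String) (done : Bool) :
    (coverUpInner (a :: b :: c :: d :: t) ([" ", " ", " ", " "], 0, done)).2.2
      = (done || decide (PySem.List.sorted [a, b, c, d]
          (fun x => if x = " " then (1 : Int) else 0) false ≠ [a, b, c, d])) := by
  obtain ⟨k, e⟩ := row_equiv a b c d t done; rw [e]

-- 'some row changed' (A's accumulated flag) = 'the matrix changed' (B's one comparison)
theorem or_eq_matrix_ne {α : Type} [DecidableEq α] (s0 s1 s2 s3 r0 r1 r2 r3 : α) :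
    (false || decide (s0 ≠ r0) || decide (s1 ≠ r1) || decide (s2 ≠ r2) || decide (s3 ≠ r3))
      = decide (([s0, s1, s2, s3] : List α) ≠ [r0, r1, r2, r3]) := by
  by_cases h0 : s0 = r0 <;> by_cases h1 : s1 = r1 <;> by_cases h2 : s2 = r2 <;>
    by_cases h3 : s3 = r3 <;> simp_all

-- ===== VERDICT (by name: the statement is the Claim_ definition above) =====
theorem cover_up_py_spec : Claim_equal_cover_up_py := by
  intro mat _ hpre
  obtain ⟨hlen, hrows⟩ := hpre
  match mat, hlen with
  | r0 :: r1 :: r2 :: r3 :: rest, _ =>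
    have h0 := hrows r0 (by simp [List.take])
    have h1 := hrows r1 (by simp [List.take])
    have h2 := hrows r2 (by simp [List.take])
    have h3 := hrows r3 (by simp [List.take])
    obtain ⟨a0, b0, c0, d0, t0, rfl⟩ : ∃ a b c d t, r0 = a :: b :: c :: d :: t := by
      match r0, h0 with
      | a :: b :: c :: d :: t, _ => exact ⟨a, b, c, d, t, rfl⟩
    obtain ⟨a1, b1, c1, d1, t1, rfl⟩ : ∃ a b c d t, r1 = a :: b :: c :: d :: t := by
      match r1, h1 with
      | a :: b :: c :: d :: t, _ => exact ⟨a, b, c, d, t, rfl⟩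
    obtain ⟨a2, b2, c2, d2, t2, rfl⟩ : ∃ a b c d t, r2 = a :: b :: c :: d :: t := by
      match r2, h2 with
      | a :: b :: c :: d :: t, _ => exact ⟨a, b, c, d, t, rfl⟩
    obtain ⟨a3, b3, c3, d3, t3, rfl⟩ : ∃ a b c d t, r3 = a :: b :: c :: d :: t := by
      match r3, h3 with
      | a :: b :: c :: d :: t, _ => exact ⟨a, b, c, d, t, rfl⟩
    show cover_up_py _ = cover_up_py_alt _
    simp only [cover_up_py, cover_up_py_alt, pyRange4, List.foldl, List.map, pg0, pg1, pg2, pg3,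
      Option.getD_some, set0, set1, set2, set3, row_fst, row_done, or_eq_matrix_ne]
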